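-- pv_equiv track=rewrite | github.com/aparfenen/grna-inspector | scripts/2_data_preparation_v4.py | get_non_grna_regions
-- ===== SOURCE A (Python) =====
-- from typing import Dict, Tuple, List, Set, Optional
--
-- def get_non_grna_regions(minicircle_id: str, minicircle_length: int,
--                          grna_coords: List[Tuple[int, int]]) -> List[Tuple[int, int]]:
--     """Calculate non-gRNA regions."""
--     if not grna_coords:
--         return [(0, minicircle_length)]
--
--     non_grna = []
--     if grna_coords[0][0] > 0:
--         non_grna.append((0, grna_coords[0][0]))
--     for i in range(len(grna_coords) - 1):
--         gap_start = grna_coords[i][1]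
--         gap_end = grna_coords[i + 1][0]
--         if gap_end > gap_start:
--             non_grna.append((gap_start, gap_end))
--     if grna_coords[-1][1] < minicircle_length:
--         non_grna.append((grna_coords[-1][1], minicircle_length))
--     return non_grna
-- ===== SOURCE B (Python) =====
-- def get_non_grna_regions(minicircle_id, minicircle_length, grna_coords):
--     """Calculate non-gRNA regions by a reverse cursor sweep (built back-to-front)."""
--     if not grna_coords:
--         return [(0, minicircle_length)]
--     out = []
--     nxt = minicircle_length  # start of the next region to the right
--     for s, e in reversed(grna_coords):
--         if nxt > e:
--             out.append((e, nxt))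
--         nxt = s
--     if nxt > 0:
--         out.append((0, nxt))
--     out.reverse()
--     return out
-- ===== Notes on version B (the rewrite author's own statement) =====
-- stated objective: alternative
-- what changed: A's three separate branches (leading-gap test, index loop pairing coords[i] with coords[i+1], trailing-gap test) are replaced by one reverse traversal with a single right-boundary cursor that emits gaps back-to-front and is reversed at the end.
import Mathlib
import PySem

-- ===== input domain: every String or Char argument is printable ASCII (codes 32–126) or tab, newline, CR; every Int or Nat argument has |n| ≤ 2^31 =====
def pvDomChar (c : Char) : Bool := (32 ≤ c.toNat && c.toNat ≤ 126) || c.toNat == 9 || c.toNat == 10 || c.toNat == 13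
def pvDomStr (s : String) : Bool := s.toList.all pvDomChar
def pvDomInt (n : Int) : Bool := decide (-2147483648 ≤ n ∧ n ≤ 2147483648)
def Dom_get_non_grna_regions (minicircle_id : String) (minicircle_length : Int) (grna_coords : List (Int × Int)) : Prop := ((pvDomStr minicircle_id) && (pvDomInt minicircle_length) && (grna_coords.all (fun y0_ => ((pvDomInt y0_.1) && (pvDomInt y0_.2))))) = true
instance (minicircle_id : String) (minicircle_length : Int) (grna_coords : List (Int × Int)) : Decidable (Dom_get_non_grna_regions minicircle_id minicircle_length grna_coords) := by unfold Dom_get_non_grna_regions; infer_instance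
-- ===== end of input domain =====

-- B replaces A's three-branch index formulation by a reverse traversal with one
-- right-boundary cursor, built back-to-front; same O(n) cost (objective: alternative).

-- ===== PORT A =====
-- literal transliteration of A: early return on empty, leading-gap branch,
-- index loop over range(len-1), trailing-gap branch (indices are in range,
-- so a default of (0,0) is never used).
def get_non_grna_regions (minicircle_id : String) (minicircle_length : Int) (grna_coords : List (Int × Int)) : List (Int × Int) :=
  if grna_coords.isEmpty then [(0, minicircle_length)]
  else
    let non_grna : List (Int × Int) :=
      if (grna_coords.getD 0 (0, 0)).1 > 0 then [((0 : Int), (grna_coords.getD 0 (0, 0)).1)] else []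
    let non_grna := (List.range (grna_coords.length - 1)).foldl
      (fun acc i =>
        let gap_start := (grna_coords.getD i (0, 0)).2
        let gap_end := (grna_coords.getD (i + 1) (0, 0)).1
        if gap_end > gap_start then acc ++ [(gap_start, gap_end)] else acc) non_grna
    if (grna_coords.getLast?.getD (0, 0)).2 < minicircle_length then
      non_grna ++ [((grna_coords.getLast?.getD (0, 0)).2, minicircle_length)]
    else non_grna

-- ===== PORT B =====
-- B: loop over reversed(grna_coords) carrying cursor nxt, appends back-to-front, final reverse.
def get_non_grna_regions_alt (minicircle_id : String) (minicircle_length : Int) (grna_coords : List (Int × Int)) : List (Int × Int) :=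
  if grna_coords.isEmpty then [(0, minicircle_length)]
  else
    let st := grna_coords.reverse.foldl
      (fun (p : List (Int × Int) × Int) se =>
        let out := if p.2 > se.2 then p.1 ++ [(se.2, p.2)] else p.1
        (out, se.1)) ([], minicircle_length)
    let out := if st.2 > 0 then st.1 ++ [((0 : Int), st.2)] else st.1
    out.reverse

-- ===== PRECONDITION & SPEC =====
def Spec_get_non_grna_regions (minicircle_id : String) (minicircle_length : Int) (grna_coords : List (Int × Int)) (out : List (Int × Int)) : Prop := out = get_non_grna_regions_alt minicircle_id minicircle_length grna_coords
instance (minicircle_id : String) (minicircle_length : Int) (grna_coords : List (Int × Int)) (out : List (Int × Int)) : Decidable (Spec_get_non_grna_regions minicircle_id minicircle_length grna_coords out) := by unfold Spec_get_non_grna_regions; infer_instance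

-- ===== CLAIM (what is proved, stated in full; the proofs are below) =====
def Claim_equal_get_non_grna_regions : Prop := ∀ (minicircle_id : String) (minicircle_length : Int) (grna_coords : List (Int × Int)), Dom_get_non_grna_regions minicircle_id minicircle_length grna_coords → Spec_get_non_grna_regions minicircle_id minicircle_length grna_coords (get_non_grna_regions minicircle_id minicircle_length grna_coords)

-- ===== LEMMAS AND PROOFS =====

-- proof-side recursive sweep: pos = end of the last consumed interval.
def pvWalk (minicircle_length : Int) (pos : Int) : List (Int × Int) → List (Int × Int)
  | [] => if minicircle_length > pos then [(pos, minicircle_length)] else []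
  | (s, e) :: rest =>
    let tail := pvWalk minicircle_length e rest
    if s > pos then (pos, s) :: tail else tail


-- A's conditional-append loop, generically: foldl = accumulator ++ map-of-filter.
theorem pv_foldl_if_append {α β : Type} (c : α → Prop) [DecidablePred c] (f : α → β) :
    ∀ (l : List α) (a : List β),
      l.foldl (fun acc i => if c i then acc ++ [f i] else acc) a
        = a ++ ((l.filter (fun i => decide (c i))).map f) := by
  intro l
  induction l with
  | nil => intro a; simp
  | cons x xs ih =>
    intro a
    simp only [List.foldl_cons, List.filter_cons]
    by_cases h : c x
    · simp [h, ih]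
    · simp [h, ih]

-- proof-side intermediate form: both programs equal this filtered boundary zip.
def pvBoundary (L : Int) (pos : Int) (coords : List (Int × Int)) : List (Int × Int) :=
  ((pos :: coords.map Prod.snd).zip (coords.map Prod.fst ++ [L])).filter (fun p => p.2 > p.1)

-- B's sweep computes the filtered boundary zip.
theorem pvWalk_eq_boundary (L : Int) :
    ∀ (coords : List (Int × Int)) (pos : Int), pvWalk L pos coords = pvBoundary L pos coords := by
  intro coords
  induction coords with
  | nil => intro pos; by_cases h : L > pos <;> simp [pvWalk, pvBoundary, h]
  | cons x xs ih =>
    intro pos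
    obtain ⟨s, e⟩ := x
    simp only [pvWalk, pvBoundary, List.map_cons, List.cons_append, List.zip_cons_cons,
      List.filter_cons]
    by_cases h : s > pos
    · simp [h, ih e, pvBoundary]
    · simp [h, ih e, pvBoundary]

-- the zip of the offset boundary tails = interior gap pairs ++ the final (last end, L) pair
theorem pv_zip_tail (L : Int) :
    ∀ (coords : List (Int × Int)), coords ≠ [] →
      (coords.map Prod.snd).zip ((coords.drop 1).map Prod.fst ++ [L])
        = (List.range (coords.length - 1)).map
            (fun i => ((coords.getD i (0, 0)).2, (coords.getD (i + 1) (0, 0)).1))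
          ++ [((coords.getLast?.getD (0, 0)).2, L)] := by
  intro coords
  induction coords with
  | nil => intro h; exact absurd rfl h
  | cons x xs ih =>
    intro _
    cases xs with
    | nil => simp
    | cons y ys =>
      have h2 := ih (by simp)
      simp only [List.map_cons, List.drop_one, List.tail_cons, List.cons_append] at h2 ⊢
      rw [List.zip_cons_cons, h2]
      have hr : List.range ((x :: y :: ys).length - 1)
          = 0 :: (List.range ((y :: ys).length - 1)).map Nat.succ := by
        simp [List.range_succ_eq_map]
      rw [hr]
      simp [List.map_map, Function.comp, List.getLast?_cons_cons]

-- A's three branches also compute the filtered boundary zip (from pos = 0).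
theorem getA_eq_boundary (minicircle_id : String) (minicircle_length : Int)
    (hd : Int × Int) (tl : List (Int × Int)) :
    get_non_grna_regions minicircle_id minicircle_length (hd :: tl)
      = pvBoundary minicircle_length 0 (hd :: tl) := by
  unfold get_non_grna_regions pvBoundary
  simp only [List.isEmpty_cons, Bool.false_eq_true, if_neg, not_false_eq_true]
  rw [pv_foldl_if_append
        (fun i => ((hd :: tl).getD (i + 1) (0, 0)).1 > ((hd :: tl).getD i (0, 0)).2)
        (fun i => (((hd :: tl).getD i (0, 0)).2, ((hd :: tl).getD (i + 1) (0, 0)).1))]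
  have hz := pv_zip_tail minicircle_length (hd :: tl) (by simp)
  simp only [List.drop_one, List.tail_cons, List.map_cons] at hz
  simp only [List.map_cons, List.cons_append, List.zip_cons_cons]
  rw [hz, List.filter_cons, List.filter_append, List.filter_map]
  have hc : ((fun p : Int × Int => decide (p.2 > p.1)) ∘
        (fun i => (((hd :: tl).getD i (0, 0)).2, ((hd :: tl).getD (i + 1) (0, 0)).1)))
      = (fun i => decide (((hd :: tl).getD (i + 1) (0, 0)).1 > ((hd :: tl).getD i (0, 0)).2)) := rfl
  rw [hc]
  by_cases h1 : hd.1 > 0 <;>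
    by_cases h2 : ((hd :: tl).getLast?.getD (0, 0)).2 < minicircle_length <;>
    simp only [List.filter_cons, List.filter_nil] <;>
    simp [h1, h2, gt_iff_lt, not_lt.mp]

-- B's reverse fold, as a foldr; characterised against the sweep pvWalk.
theorem pvFoldr_eq_walk (L : Int) :
    ∀ (coords : List (Int × Int)) (pos : Int),
      (let st := coords.foldr
          (fun se (p : List (Int × Int) × Int) =>
            let out := if p.2 > se.2 then p.1 ++ [(se.2, p.2)] else p.1
            (out, se.1)) ([], L)
       (if st.2 > pos then st.1 ++ [(pos, st.2)] else st.1).reverse)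
        = pvWalk L pos coords := by
  intro coords
  induction coords with
  | nil =>
    intro pos
    by_cases h : L > pos <;> simp [pvWalk, h]
  | cons x xs ih =>
    intro pos
    obtain ⟨s, e⟩ := x
    simp only [List.foldr_cons, pvWalk]
    have ihe := ih e
    simp only at ihe ⊢
    by_cases h : s > pos
    · simp [h, ← ihe]
    · simp [h, ← ihe]

theorem get_non_grna_regions_eq (minicircle_id : String) (minicircle_length : Int)
    (grna_coords : List (Int × Int)) :
    get_non_grna_regions minicircle_id minicircle_length grna_coords
      = get_non_grna_regions_alt minicircle_id minicircle_length grna_coords := by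
  cases grna_coords with
  | nil => rfl
  | cons hd tl =>
    unfold get_non_grna_regions_alt
    simp only [List.isEmpty_cons, Bool.false_eq_true, if_neg, not_false_eq_true,
      List.foldl_reverse]
    rw [getA_eq_boundary, ← pvWalk_eq_boundary]
    exact (pvFoldr_eq_walk minicircle_length (hd :: tl) 0).symm

-- ===== VERDICT (by name: the statement is the Claim_ definition above) =====
theorem get_non_grna_regions_spec : Claim_equal_get_non_grna_regions := by
  intro id L coords _
  unfold Spec_get_non_grna_regions
  exact get_non_grna_regions_eq id L coords
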